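-- pv_equiv track=rewrite | github.com/allenai/mmda | src/mmda/parsers/pdfplumber_parser.py | _align_coarse_and_fine_tokens
-- ===== SOURCE A (Python) =====
-- from typing import List, Optional, Union
--
-- def _align_coarse_and_fine_tokens(
--     coarse_tokens: List[str], fine_tokens: List[str]
-- ) -> List[int]:
--     """Returns a list of length len(fine_tokens) where elements of the list are
--     integer indices into coarse_tokens elements."""
--     assert len(coarse_tokens) <= len(
--         fine_tokens
--     ), f"This method requires |coarse| <= |fine|"
--     assert "".join(coarse_tokens) == "".join(
--         fine_tokens
--     ), f"This method requires the chars(coarse) == chars(fine)"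
--
--     coarse_start_ends = []
--     start = 0
--     for token in coarse_tokens:
--         end = start + len(token)
--         coarse_start_ends.append((start, end))
--         start = end
--
--     fine_start_ends = []
--     start = 0
--     for token in fine_tokens:
--         end = start + len(token)
--         fine_start_ends.append((start, end))
--         start = end
--
--     fine_id = 0
--     coarse_id = 0
--     out = []
--     while fine_id < len(fine_start_ends) and coarse_id < len(coarse_start_ends):
--         fine_start, fine_end = fine_start_ends[fine_id]
--         coarse_start, coarse_end = coarse_start_ends[coarse_id]
--         if coarse_start <= fine_start and fine_end <= coarse_end:
--             out.append(coarse_id)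
--             fine_id += 1
--         else:
--             coarse_id += 1
--
--     return out
-- ===== SOURCE B (Python) =====
-- def _align_coarse_and_fine_tokens(coarse_tokens, fine_tokens):
--     """Returns a list of length len(fine_tokens) where elements of the list are
--     integer indices into coarse_tokens elements."""
--     assert len(coarse_tokens) <= len(
--         fine_tokens
--     ), f"This method requires |coarse| <= |fine|"
--     assert "".join(coarse_tokens) == "".join(
--         fine_tokens
--     ), f"This method requires the chars(coarse) == chars(fine)"
--
--     # cumulative character end positions of the coarse tokens
--     ends = []
--     total = 0
--     for token in coarse_tokens:
--         total += len(token)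
--         ends.append(total)
--
--     out = []
--     fine_start = 0
--     for token in fine_tokens:
--         fine_end = fine_start + len(token)
--         # binary search: first coarse index whose end reaches fine_end
--         lo, hi = 0, len(ends)
--         while lo < hi:
--             mid = (lo + hi) // 2
--             if ends[mid] < fine_end:
--                 lo = mid + 1
--             else:
--                 hi = mid
--         idx = lo
--         # stop if no coarse token contains this fine token
--         if idx == len(ends) or (idx > 0 and ends[idx - 1] > fine_start):
--             break
--         out.append(idx)
--         fine_start = fine_end
--     return out
-- ===== Notes on version B (the rewrite author's own statement) =====
-- stated objective: alternative
-- what changed: Replaces A's stateful two-pointer merge over precomputed (start,end) span pairs with a per-fine-token binary search over the cumulative coarse end-offset list: the containing coarse index is the first position whose end reaches the fine token's end, with a break when no coarse token contains it.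
import Mathlib
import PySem

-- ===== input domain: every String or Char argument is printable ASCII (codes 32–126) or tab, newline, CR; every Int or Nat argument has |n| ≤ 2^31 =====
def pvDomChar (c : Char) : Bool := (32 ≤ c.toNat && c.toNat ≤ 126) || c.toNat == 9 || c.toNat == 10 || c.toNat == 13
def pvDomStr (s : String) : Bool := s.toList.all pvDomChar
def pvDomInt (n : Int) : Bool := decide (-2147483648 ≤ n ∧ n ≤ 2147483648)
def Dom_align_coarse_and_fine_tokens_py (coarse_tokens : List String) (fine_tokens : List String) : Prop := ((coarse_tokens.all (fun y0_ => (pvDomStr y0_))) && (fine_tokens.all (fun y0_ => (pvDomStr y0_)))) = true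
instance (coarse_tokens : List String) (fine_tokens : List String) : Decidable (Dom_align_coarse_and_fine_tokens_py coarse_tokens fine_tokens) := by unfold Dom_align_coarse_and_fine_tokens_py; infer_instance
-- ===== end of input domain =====

-- B replaces A's stateful two-pointer merge by a per-token binary search into the
-- coarse end-offset list (objective: alternative, same return value).

-- ===== PORT A =====
-- the span-building loops of A (start/end pairs, cumulative over token lengths)
def pvSpans (start : Int) : List String → List (Int × Int)
  | [] => []
  | tok :: rest =>
    let e := start + PySem.Str.len tok
    (start, e) :: pvSpans e rest

-- A's while-loop over (fine_id, coarse_id, out)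
def pvAwhile (cse fse : List (Int × Int)) (fine_id coarse_id : Nat) (out : List Int) :
    List Int :=
  if h : fine_id < fse.length ∧ coarse_id < cse.length then
    let f := fse.getD fine_id (0, 0)
    let c := cse.getD coarse_id (0, 0)
    if c.1 ≤ f.1 ∧ f.2 ≤ c.2 then
      pvAwhile cse fse (fine_id + 1) coarse_id (out ++ [(coarse_id : Int)])
    else
      pvAwhile cse fse fine_id (coarse_id + 1) out
  else out
termination_by (fse.length - fine_id) + (cse.length - coarse_id)
decreasing_by all_goals omega

def align_coarse_and_fine_tokens_py (coarse_tokens : List String) (fine_tokens : List String) : List Int :=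
  pvAwhile (pvSpans 0 coarse_tokens) (pvSpans 0 fine_tokens) 0 0 []

-- ===== PORT B =====
-- cumulative end offsets of the coarse tokens
def pvEnds (total : Int) : List String → List Int
  | [] => []
  | tok :: rest =>
    let t := total + PySem.Str.len tok
    t :: pvEnds t rest

-- B's inner while-loop: binary search for the first index with ends[i] >= x
-- ((lo + hi) // 2 on nonnegative Python ints is exactly Nat division here)
def pvBsearch (ends : List Int) (x : Int) (lo hi : Nat) : Nat :=
  if lo < hi then
    let mid := (lo + hi) / 2
    if ends.getD mid 0 < x then pvBsearch ends x (mid + 1) hi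
    else pvBsearch ends x lo mid
  else lo
termination_by hi - lo
decreasing_by all_goals omega

-- B's for-loop with break, building out front-to-back
def pvBloop (ends : List Int) (fine_start : Int) : List String → List Int
  | [] => []
  | tok :: rest =>
    let fine_end := fine_start + PySem.Str.len tok
    let idx := pvBsearch ends fine_end 0 ends.length
    if idx = ends.length ∨ (0 < idx ∧ ends.getD (idx - 1) 0 > fine_start) then []
    else (idx : Int) :: pvBloop ends fine_end rest

def align_coarse_and_fine_tokens_py_alt (coarse_tokens : List String) (fine_tokens : List String) : List Int :=
  pvBloop (pvEnds 0 coarse_tokens) 0 fine_tokens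

-- ===== PRECONDITION & SPEC =====
-- Pre_ excludes exactly the inputs on which A's two asserts raise AssertionError:
-- |coarse| > |fine| or the concatenated characters differ.
def Pre_align_coarse_and_fine_tokens_py (coarse_tokens : List String) (fine_tokens : List String) : Prop :=
  coarse_tokens.length ≤ fine_tokens.length ∧
    coarse_tokens.flatMap String.toList = fine_tokens.flatMap String.toList
instance (coarse_tokens : List String) (fine_tokens : List String) : Decidable (Pre_align_coarse_and_fine_tokens_py coarse_tokens fine_tokens) := by unfold Pre_align_coarse_and_fine_tokens_py; infer_instance

def pvWitness_align_coarse_and_fine_tokens_py : List String × List String :=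
  (["ab", "c"], ["a", "b", "c"])

def Spec_align_coarse_and_fine_tokens_py (coarse_tokens : List String) (fine_tokens : List String) (out : List Int) : Prop := out = align_coarse_and_fine_tokens_py_alt coarse_tokens fine_tokens
instance (coarse_tokens : List String) (fine_tokens : List String) (out : List Int) : Decidable (Spec_align_coarse_and_fine_tokens_py coarse_tokens fine_tokens out) := by unfold Spec_align_coarse_and_fine_tokens_py; infer_instance

-- ===== CLAIM (what is proved, stated in full; the proofs are below) =====
def Claim_equal_align_coarse_and_fine_tokens_py : Prop := ∀ (coarse_tokens : List String) (fine_tokens : List String), Dom_align_coarse_and_fine_tokens_py coarse_tokens fine_tokens → Pre_align_coarse_and_fine_tokens_py coarse_tokens fine_tokens → Spec_align_coarse_and_fine_tokens_py coarse_tokens fine_tokens (align_coarse_and_fine_tokens_py coarse_tokens fine_tokens)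

-- ===== LEMMAS AND PROOFS =====

-- partial sums of the token lengths: pvCsum toks k = len(toks[0]) + … + len(toks[k-1])
def pvCsum : List String → Nat → Int
  | _, 0 => 0
  | [], _ + 1 => 0
  | t :: r, k + 1 => PySem.Str.len t + pvCsum r k

lemma pvCsum_nonneg (toks : List String) (k : Nat) : 0 ≤ pvCsum toks k := by
  induction toks generalizing k with
  | nil => cases k <;> simp [pvCsum]
  | cons t r ih =>
    cases k with
    | zero => simp [pvCsum]
    | succ k => have := ih k; simp only [pvCsum, PySem.Str.len_eq]; positivity

lemma pvCsum_mono (toks : List String) {j k : Nat} (h : j ≤ k) :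
    pvCsum toks j ≤ pvCsum toks k := by
  induction toks generalizing j k with
  | nil => cases j <;> cases k <;> simp [pvCsum]
  | cons t r ih =>
    cases j with
    | zero =>
      have := pvCsum_nonneg (t :: r) k; simpa [pvCsum] using this
    | succ j =>
      cases k with
      | zero => omega
      | succ k => have := ih (Nat.succ_le_succ_iff.mp h); simp only [pvCsum]; omega

lemma pvCsum_succ (toks : List String) (k : Nat) (h : k < toks.length) :
    pvCsum toks (k + 1) = pvCsum toks k + PySem.Str.len toks[k] := by
  induction toks generalizing k with
  | nil => simp at h
  | cons t r ih =>
    cases k with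
    | zero => simp [pvCsum]
    | succ k =>
      simp only [pvCsum, List.getElem_cons_succ]
      rw [ih k (by simpa using h)]; ring

lemma pvSpans_length (b : Int) (toks : List String) : (pvSpans b toks).length = toks.length := by
  induction toks generalizing b with
  | nil => simp [pvSpans]
  | cons t r ih => simp [pvSpans, ih]

lemma pvEnds_length (b : Int) (toks : List String) : (pvEnds b toks).length = toks.length := by
  induction toks generalizing b with
  | nil => simp [pvEnds]
  | cons t r ih => simp [pvEnds, ih]

lemma pvSpans_getD (b : Int) (toks : List String) (k : Nat) (h : k < toks.length) :
    (pvSpans b toks).getD k (0, 0) = (b + pvCsum toks k, b + pvCsum toks (k + 1)) := by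
  induction toks generalizing b k with
  | nil => simp at h
  | cons t r ih =>
    cases k with
    | zero =>
      cases r with
      | nil => simp [pvSpans, pvCsum]
      | cons u s => simp [pvSpans, pvCsum]
    | succ k =>
      have := ih (b + PySem.Str.len t) k (by simpa using h)
      simp only [pvSpans, List.getD_cons_succ, this, pvCsum, Prod.mk.injEq]
      constructor <;> ring

lemma pvEnds_getD (b : Int) (toks : List String) (k : Nat) (h : k < toks.length) :
    (pvEnds b toks).getD k 0 = b + pvCsum toks (k + 1) := by
  induction toks generalizing b k with
  | nil => simp at h
  | cons t r ih =>
    cases k with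
    | zero =>
      cases r with
      | nil => simp [pvEnds, pvCsum]
      | cons u s => simp [pvEnds, pvCsum]
    | succ k =>
      have := ih (b + PySem.Str.len t) k (by simpa using h)
      simp only [pvEnds, List.getD_cons_succ, this, pvCsum]
      ring

lemma pvEnds_ge (b : Int) (toks : List String) : ∀ e ∈ pvEnds b toks, b ≤ e := by
  induction toks generalizing b with
  | nil => simp [pvEnds]
  | cons t r ih =>
    intro e he
    have hlen : (0 : Int) ≤ PySem.Str.len t := by simp [PySem.Str.len_eq]
    simp only [pvEnds, List.mem_cons] at he
    rcases he with rfl | he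
    · omega
    · have := ih (b + PySem.Str.len t) e he; omega

-- characterization of B's count: position k's end is < x exactly when k is below the count
lemma pvEnds_countP_lt_iff (b x : Int) (toks : List String) (k : Nat) (h : k < toks.length) :
    ((pvEnds b toks).getD k 0 < x ↔
      k < (pvEnds b toks).countP (fun e => decide (e < x))) := by
  induction toks generalizing b k with
  | nil => simp at h
  | cons t r ih =>
    have hlen := pvEnds_length (b + PySem.Str.len t) r
    by_cases hlt : b + PySem.Str.len t < x
    · cases k with
      | zero =>
        simp only [pvEnds, List.getD_cons_zero, List.countP_cons, decide_eq_true_eq,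
          if_pos hlt]
        omega
      | succ k =>
        have hIH := ih (b + PySem.Str.len t) k (by simpa using h)
        simp only [pvEnds, List.getD_cons_succ, List.countP_cons, decide_eq_true_eq,
          if_pos hlt]
        omega
    · have hzero : (pvEnds (b + PySem.Str.len t) r).countP (fun e => decide (e < x)) = 0 := by
        rw [List.countP_eq_zero]
        intro e he
        have := pvEnds_ge (b + PySem.Str.len t) r e he
        simp only [decide_eq_true_eq]; omega
      cases k with
      | zero =>
        simp only [pvEnds, List.getD_cons_zero, List.countP_cons, decide_eq_true_eq,
          if_neg hlt, hzero]
        omega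
      | succ k =>
        have hk : k < r.length := by simpa using h
        have hk' : k < (pvEnds (b + PySem.Str.len t) r).length := by omega
        have hget : (pvEnds (b + PySem.Str.len t) r).getD k 0
            = (pvEnds (b + PySem.Str.len t) r)[k] := List.getD_eq_getElem _ _ hk'
        have hge := pvEnds_ge (b + PySem.Str.len t) r _ (hget ▸ List.getElem_mem hk')
        simp only [pvEnds, List.getD_cons_succ, List.countP_cons, decide_eq_true_eq,
          if_neg hlt, hzero]
        omega

lemma pvEnds_countP_le (b x : Int) (toks : List String) :
    (pvEnds b toks).countP (fun e => decide (e < x)) ≤ toks.length := by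
  have := List.countP_le_length (l := pvEnds b toks) (p := fun e => decide (e < x))
  rwa [pvEnds_length] at this

-- the binary search finds the count of elements below x, given the count characterization
lemma pvBsearch_eq (ends : List Int) (x : Int) (K : Nat)
    (hKlen : K ≤ ends.length)
    (hchar : ∀ k < ends.length, (ends.getD k 0 < x ↔ k < K)) :
    ∀ lo hi, lo ≤ K → K ≤ hi → hi ≤ ends.length → pvBsearch ends x lo hi = K := by
  intro lo hi
  induction hd : hi - lo using Nat.strong_induction_on generalizing lo hi with
  | _ n ih =>
    intro hlo hhi hlen
    rw [pvBsearch]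
    split
    · next hlt =>
      by_cases hmid : ends.getD ((lo + hi) / 2) 0 < x
      · rw [if_pos hmid]
        have : (lo + hi) / 2 < K := (hchar _ (by omega)).mp hmid
        exact ih (hi - ((lo + hi) / 2 + 1)) (by omega) _ _ rfl (by omega) hhi hlen
      · rw [if_neg hmid]
        have : ¬ (lo + hi) / 2 < K := fun hc => hmid ((hchar _ (by omega)).mpr hc)
        exact ih ((lo + hi) / 2 - lo) (by omega) _ _ rfl hlo (by omega) (by omega)
    · omega

-- on a pvEnds list the binary search computes the count of ends below x
lemma pvBsearch_pvEnds (b x : Int) (toks : List String) :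
    pvBsearch (pvEnds b toks) x 0 (pvEnds b toks).length
      = (pvEnds b toks).countP (fun e => decide (e < x)) := by
  apply pvBsearch_eq
  · exact List.countP_le_length
  · intro k hk
    rw [pvEnds_length] at hk
    exact pvEnds_countP_lt_iff b x toks k hk
  · omega
  · exact List.countP_le_length
  · omega

-- A's while-loop returns out unchanged once no remaining coarse span can contain fine span j
lemma pvAwhile_exhaust (cse fse : List (Int × Int)) (j : Nat) (out : List Int) :
    ∀ c, (∀ c', c ≤ c' → c' < cse.length →
        ¬ ((cse.getD c' (0, 0)).1 ≤ (fse.getD j (0, 0)).1 ∧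
           (fse.getD j (0, 0)).2 ≤ (cse.getD c' (0, 0)).2)) →
      pvAwhile cse fse j c out = out := by
  intro c
  induction hn : cse.length - c using Nat.strong_induction_on generalizing c with
  | _ n ih =>
    intro hnone
    rw [pvAwhile]
    split
    · next hcond =>
      obtain ⟨hj, hc⟩ := hcond
      have hnc := hnone c (le_refl c) hc
      simp only [if_neg hnc]
      exact ih (cse.length - (c + 1)) (by omega) (c + 1) rfl
        (fun c' h1 h2 => hnone c' (by omega) h2)
    · rfl

-- the main loop correspondence
lemma pvAwhile_eq_pvBloop (C F : List String) :
    ∀ N j c (out : List Int),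
      (F.length - j) + (C.length - c) ≤ N →
      j ≤ F.length → c ≤ C.length →
      (j < F.length →
        c ≤ (pvEnds 0 C).countP (fun e => decide (e < pvCsum F (j + 1)))) →
      pvAwhile (pvSpans 0 C) (pvSpans 0 F) j c out
        = out ++ pvBloop (pvEnds 0 C) (pvCsum F j) (F.drop j) := by
  intro N
  induction N with
  | zero =>
    intro j c out hm hj hc hidx
    have hj' : j = F.length := by omega
    subst hj'
    rw [pvAwhile]
    rw [dif_neg (by rw [pvSpans_length]; omega)]
    simp [List.drop_length, pvBloop]
  | succ N ih =>
    intro j c out hm hj hc hidx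
    by_cases hjm : j < F.length
    · -- the fine side still has tokens
      have hdrop : F.drop j = F[j] :: F.drop (j + 1) :=
        List.drop_eq_getElem_cons hjm
      have hfe : pvCsum F j + PySem.Str.len F[j] = pvCsum F (j + 1) :=
        (pvCsum_succ F j hjm).symm
      set K := (pvEnds 0 C).countP (fun e => decide (e < pvCsum F (j + 1))) with hK
      have hKle : K ≤ C.length := pvEnds_countP_le _ _ _
      have hcK : c ≤ K := hidx hjm
      by_cases hcn : c < C.length
      · -- A's loop runs
        have hfsj : (pvSpans 0 F).getD j (0, 0) = (pvCsum F j, pvCsum F (j + 1)) := by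
          rw [pvSpans_getD 0 F j hjm]; simp
        have hcsc : (pvSpans 0 C).getD c (0, 0) = (pvCsum C c, pvCsum C (c + 1)) := by
          rw [pvSpans_getD 0 C c hcn]; simp
        rw [pvAwhile, dif_pos (by rw [pvSpans_length, pvSpans_length]; exact ⟨hjm, hcn⟩)]
        simp only [hfsj, hcsc]
        by_cases hcont : pvCsum C c ≤ pvCsum F j ∧ pvCsum F (j + 1) ≤ pvCsum C (c + 1)
        · -- containment: A appends c; B appends idx = c
          have hendc : (pvEnds 0 C).getD c 0 = pvCsum C (c + 1) := by
            rw [pvEnds_getD 0 C c hcn]; simp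
          have hiff := pvEnds_countP_lt_iff 0 (pvCsum F (j + 1)) C c hcn
          rw [hendc] at hiff
          have hcgeK : ¬ c < K := by omega
          have hceK : c = K := by omega
          rw [if_pos hcont]
          have hrec := ih (j + 1) c (out ++ [(c : Int)]) (by omega) (by omega) (by omega)
            (by
              intro hj1
              have hmono : (pvEnds 0 C).countP (fun e => decide (e < pvCsum F (j + 1)))
                  ≤ (pvEnds 0 C).countP (fun e => decide (e < pvCsum F (j + 1 + 1))) := by
                apply List.countP_mono_left
                intro a _ ha
                simp only [decide_eq_true_eq] at ha ⊢
                have := pvCsum_mono F (show j + 1 ≤ j + 1 + 1 by omega)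
                omega
              omega)
          rw [hrec]
          -- unfold B's step
          rw [hdrop]
          show out ++ [(c : Int)] ++ _ = out ++ pvBloop _ _ _
          rw [pvBloop]
          simp only [hfe, pvBsearch_pvEnds, ← hK]
          have hnobreak : ¬ (K = (pvEnds 0 C).length ∨
              (0 < K ∧ (pvEnds 0 C).getD (K - 1) 0 > pvCsum F j)) := by
            rintro (hKn | ⟨hK0, hKgt⟩)
            · rw [pvEnds_length] at hKn; omega
            · have hk1 : K - 1 < C.length := by omega
              rw [pvEnds_getD 0 C (K - 1) hk1] at hKgt
              have h1 : K - 1 + 1 = K := by omega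
              rw [h1, ← hceK] at hKgt
              simp only [zero_add] at hKgt
              omega
          rw [if_neg hnobreak]
          rw [hceK, List.append_assoc]
          simp
        · -- no containment at c
          rw [if_neg hcont]
          by_cases hcltK : c < K
          · -- c is still below the count: A advances the coarse pointer
            exact ih j (c + 1) out (by omega) (by omega) (by omega) (fun _ => by omega)
          · -- c = K but the coarse start is past fine_start: both stop
            have hceK : c = K := by omega
            have hendc : (pvEnds 0 C).getD c 0 = pvCsum C (c + 1) := by
              rw [pvEnds_getD 0 C c hcn]; simp
            have hiff := pvEnds_countP_lt_iff 0 (pvCsum F (j + 1)) C c hcn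
            rw [hendc] at hiff
            have hCEc : pvCsum F (j + 1) ≤ pvCsum C (c + 1) := by omega
            have hCS : pvCsum F j < pvCsum C c := by
              by_contra hle
              exact hcont ⟨by omega, hCEc⟩
            have hc0 : 0 < c := by
              by_contra h0
              have : c = 0 := by omega
              subst this
              have := pvCsum_nonneg F j
              simp [pvCsum] at hCS
              omega
            -- A exhausts the coarse list
            have hA : pvAwhile (pvSpans 0 C) (pvSpans 0 F) j (c + 1) out = out := by
              apply pvAwhile_exhaust
              intro c' h1 h2
              rw [pvSpans_length] at h2
              rw [pvSpans_getD 0 C c' h2, pvSpans_getD 0 F j hjm]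
              simp only [zero_add]
              rintro ⟨hcs, -⟩
              have := pvCsum_mono C (show c ≤ c' by omega)
              omega
            rw [hA]
            -- B breaks
            rw [hdrop, pvBloop]
            simp only [hfe, pvBsearch_pvEnds, ← hK]
            rw [if_pos]
            · simp
            · right
              refine ⟨by omega, ?_⟩
              have hk1 : K - 1 < C.length := by omega
              rw [pvEnds_getD 0 C (K - 1) hk1]
              have : K - 1 + 1 = K := by omega
              rw [this, ← hceK]
              simp only [zero_add]
              omega
      · -- coarse exhausted with fine remaining: K = C.length, B breaks
        have hceq : c = C.length := by omega
        rw [pvAwhile, dif_neg (by rw [pvSpans_length, pvSpans_length]; omega)]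
        rw [hdrop, pvBloop]
        simp only [hfe, pvBsearch_pvEnds, ← hK]
        rw [if_pos (Or.inl (by rw [pvEnds_length]; omega))]
        simp
    · -- fine exhausted: both return out
      have hj' : j = F.length := by omega
      subst hj'
      rw [pvAwhile, dif_neg (by rw [pvSpans_length]; omega)]
      simp [List.drop_length, pvBloop]

-- ===== VERDICT (by name: the statement is the Claim_ definition above) =====
theorem align_coarse_and_fine_tokens_py_spec : Claim_equal_align_coarse_and_fine_tokens_py := by
  intro coarse fine _ _
  show align_coarse_and_fine_tokens_py coarse fine = align_coarse_and_fine_tokens_py_alt coarse fine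
  unfold align_coarse_and_fine_tokens_py align_coarse_and_fine_tokens_py_alt
  have := pvAwhile_eq_pvBloop coarse fine (fine.length + coarse.length) 0 0 []
    (by omega) (by omega) (by omega) (fun _ => by omega)
  simpa [pvCsum] using this
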